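-- pv_equiv track=rewrite | github.com/imaldiris/folder-for-work | ex28.py | Keymaker
-- ===== SOURCE A (Python) =====
-- def list_of_doors(k : int):
--     door = '1 ' * k
--     door = door[:-1]
--     doors = door.split(' ')
--     return doors
--
-- def string_of_doors(doors : list):
--     door = ''.join(doors)
--     return door
--
-- def Keymaker(k : int):
--     step = 1
--     doors = list_of_doors(k)
--     for i in range(1,k):
--         for j in range(i,k,step+1):
--             doors[j] = '0' if doors[j] == '1' else '1'
--         step += 1
--     door = string_of_doors(doors)
--     return door
-- ===== SOURCE B (Python) =====
-- def Keymaker(k: int):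
--     # Door j (0-based) ends open ('1') iff j+1 is a perfect square:
--     # it is toggled once per divisor d of j+1 with 2 <= d <= j+1.
--     # Single pass tracking the next perfect square s*s.
--     out = []
--     s = 1
--     for n in range(1, k + 1):
--         if n == s * s:
--             out.append('1')
--             s += 1
--         else:
--             out.append('0')
--     return ''.join(out)
-- ===== Notes on version B (the rewrite author's own statement) =====
-- stated objective: faster
-- what changed: Replaced the nested divisor-stride toggling loops by a single O(k) pass that marks door j open exactly when j+1 is a perfect square (locker problem), tracking the next square incrementally.
import Mathlib
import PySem

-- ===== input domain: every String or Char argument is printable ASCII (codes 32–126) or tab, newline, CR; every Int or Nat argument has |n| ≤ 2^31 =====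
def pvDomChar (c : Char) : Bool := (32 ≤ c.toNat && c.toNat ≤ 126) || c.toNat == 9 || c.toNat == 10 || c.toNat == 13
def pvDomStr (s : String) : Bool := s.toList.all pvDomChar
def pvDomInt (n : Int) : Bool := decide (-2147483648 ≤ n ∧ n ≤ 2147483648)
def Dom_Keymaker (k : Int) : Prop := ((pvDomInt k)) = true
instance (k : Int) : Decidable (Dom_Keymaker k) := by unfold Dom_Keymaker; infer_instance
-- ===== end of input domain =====

-- B replaces A's nested divisor-stride toggling by one pass that marks door j open
-- exactly when j+1 is a perfect square (locker problem), tracking the next square.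

-- ===== PORT A =====
def list_of_doors (k : Int) : List String :=
  let door : List Char := PySem.List.pyRepeat ['1', ' '] k       -- door = '1 ' * k
  let door := PySem.List.slice door none (some (-1))             -- door = door[:-1]
  (PySem.Chars.splitOn door [' ']).map String.ofList             -- doors = door.split(' ')

def string_of_doors (doors : List String) : String :=
  PySem.Str.join "" doors                                        -- ''.join(doors)

def Keymaker (k : Int) : String :=
  let step : Int := 1
  let doors := list_of_doors k
  let res := (PySem.List.pyRange 1 k 1).foldl                    -- for i in range(1,k):
    (fun (st : List String × Int) i =>
      let doors := st.1
      let step := st.2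
      let doors := (PySem.List.pyRange i k (step + 1)).foldl     -- for j in range(i,k,step+1):
        (fun ds j =>
          PySem.List.pySetD ds j
            (if PySem.List.pyGetD ds j "" = "1" then "0" else "1")) doors
      (doors, step + 1))                                         -- step += 1
    (doors, step)
  string_of_doors res.1

-- ===== PORT B =====
def Keymaker_alt (k : Int) : String :=
  let res := (PySem.List.pyRange 1 (k + 1) 1).foldl              -- for n in range(1, k+1):
    (fun (st : List String × Int) n =>
      let out := st.1
      let s := st.2
      if n = s * s then (out ++ ["1"], s + 1) else (out ++ ["0"], s))
    (([] : List String), (1 : Int))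
  PySem.Str.join "" res.1                                        -- ''.join(out)

-- ===== PRECONDITION & SPEC =====
def Spec_Keymaker (k : Int) (out : String) : Prop := out = Keymaker_alt k
instance (k : Int) (out : String) : Decidable (Spec_Keymaker k out) := by unfold Spec_Keymaker; infer_instance

-- ===== CLAIM (what is proved, stated in full; the proofs are below) =====
def Claim_equal_Keymaker : Prop := ∀ (k : Int), Dom_Keymaker k → Spec_Keymaker k (Keymaker k)

-- ===== LEMMAS AND PROOFS =====

-- The common value: door j (0-based) is "1" iff j+1 is a perfect square.
def sqDoor (m : Nat) : String := if Nat.sqrt m * Nat.sqrt m = m then "1" else "0"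
def specDoors (n : Nat) : List String := (List.range n).map (fun j => sqDoor (j + 1))

lemma specDoors_succ (n : Nat) : specDoors (n+1) = specDoors n ++ [sqDoor (n+1)] := by
  simp [specDoors, List.range_succ]

-- ---- B-side: the incremental next-square scan produces specDoors ----
lemma B_fold (n : Nat) :
    (PySem.List.pyRange 1 ((n : Int) + 1) 1).foldl
      (fun (st : List String × Int) i =>
        if i = st.2 * st.2 then (st.1 ++ ["1"], st.2 + 1) else (st.1 ++ ["0"], st.2))
      (([] : List String), (1 : Int))
    = (specDoors n, (Nat.sqrt n : Int) + 1) := by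
  induction n with
  | zero => simp [PySem.List.pyRange_one_eq_nil, specDoors]
  | succ n ih =>
    have hs1 : Nat.sqrt n * Nat.sqrt n ≤ n := Nat.sqrt_le n
    have hs2 : n < (Nat.sqrt n + 1) * (Nat.sqrt n + 1) := Nat.lt_succ_sqrt n
    have hmono : Nat.sqrt n ≤ Nat.sqrt (n+1) := Nat.sqrt_le_sqrt (by omega)
    have hmono2 : Nat.sqrt (n+1) ≤ Nat.sqrt n + 1 := by
      have h := Nat.sqrt_lt.mpr (show n+1 < (Nat.sqrt n + 2) * (Nat.sqrt n + 2) by nlinarith)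
      omega
    have hs1' : Nat.sqrt (n+1) * Nat.sqrt (n+1) ≤ n+1 := Nat.sqrt_le (n+1)
    have hs2' : n+1 < (Nat.sqrt (n+1) + 1) * (Nat.sqrt (n+1) + 1) := Nat.lt_succ_sqrt (n+1)
    have hsplit : PySem.List.pyRange 1 (((n+1 : Nat) : Int) + 1) 1
        = PySem.List.pyRange 1 ((n : Int) + 1) 1 ++ [(n : Int) + 1] := by
      have h := PySem.List.pyRange_one_succ_right (a := 1) (b := (n : Int) + 1) (by omega)
      push_cast
      convert h using 2
    rw [hsplit, List.foldl_append, ih, List.foldl_cons, List.foldl_nil]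
    by_cases hsq : ((n : Int) + 1) = ((Nat.sqrt n : Int) + 1) * ((Nat.sqrt n : Int) + 1)
    · have hnat : (Nat.sqrt n + 1) * (Nat.sqrt n + 1) = n + 1 := by exact_mod_cast hsq.symm
      have hroot : Nat.sqrt (n+1) = Nat.sqrt n + 1 := by nlinarith
      have hsqd : sqDoor (n+1) = "1" := by simp [sqDoor, hroot, hnat]
      simp [hsq, specDoors_succ, hsqd, hroot]
    · have hroot : Nat.sqrt (n+1) = Nat.sqrt n := by
        by_cases h : Nat.sqrt (n+1) = Nat.sqrt n + 1
        · exfalso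
          apply hsq
          have heq : (Nat.sqrt n + 1) * (Nat.sqrt n + 1) = n+1 := by nlinarith
          have hc := congrArg (fun x : Nat => (x : Int)) heq
          push_cast at hc
          linarith
        · omega
      have hnsq : ¬ (Nat.sqrt (n+1) * Nat.sqrt (n+1) = n+1) := by
        rw [hroot]
        omega
      have hsqd : sqDoor (n+1) = "0" := by simp [sqDoor, hnsq]
      simp [hsq, specDoors_succ, hsqd, hroot]

lemma B_eq (k : Int) : Keymaker_alt k = PySem.Str.join "" (specDoors k.toNat) := by
  by_cases hk : k ≤ 0
  · have h0 : PySem.List.pyRange 1 (k+1) 1 = [] := PySem.List.pyRange_one_eq_nil (by omega)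
    simp [Keymaker_alt, h0, specDoors, Int.toNat_of_nonpos hk]
  · have hn : ((k.toNat : Nat) : Int) = k := by omega
    have h := B_fold k.toNat
    rw [hn] at h
    simp only [Keymaker_alt]
    rw [h]

-- ---- A-side: list_of_doors returns k copies of "1" ----
def body (n : Nat) : List Char := (List.replicate n [' ', '1']).flatten

lemma body_succ (n : Nat) : body (n+1) = ' ' :: '1' :: body n := by
  simp [body, List.replicate_succ]

lemma go_ones (n : Nat) : ∀ (fuel : Nat) (acc : List (List Char)), 2*n+2 ≤ fuel →
    PySem.Chars.splitOn.go [' '] fuel ('1' :: body n) [] acc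
      = acc.reverse ++ List.replicate (n+1) ['1'] := by
  induction n with
  | zero =>
    intro fuel acc hf
    obtain ⟨f1, rfl⟩ : ∃ f1, fuel = f1 + 1 := ⟨fuel - 1, by omega⟩
    rw [PySem.Chars.splitOn.go.eq_def]
    simp only [body, List.replicate, List.flatten_nil, List.isPrefixOf]
    rw [if_neg (by decide)]
    cases f1 with
    | zero => rw [PySem.Chars.splitOn.go.eq_def]; simp
    | succ f2 => rw [PySem.Chars.splitOn.go.eq_def]; simp
  | succ n ih =>
    intro fuel acc hf
    obtain ⟨f2, rfl⟩ : ∃ f2, fuel = f2 + 1 + 1 := ⟨fuel - 2, by omega⟩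
    rw [body_succ, PySem.Chars.splitOn.go.eq_def]
    simp only [List.isPrefixOf]
    rw [if_neg (by decide)]
    rw [PySem.Chars.splitOn.go.eq_def]
    simp only [List.isPrefixOf]
    rw [if_pos (by decide)]
    simp only [List.length_cons, List.length_nil, List.drop_succ_cons, List.drop_zero]
    have hrev : (['1'] : List Char).reverse = ['1'] := by decide
    rw [hrev, ih f2 (['1'] :: acc) (by omega)]
    simp [List.replicate_succ]

lemma length_body (m : Nat) : (body m).length = 2 * m := by
  simp [body, Nat.mul_comm]

lemma flat_rep (m : Nat) : (List.replicate (m+1) ['1', ' ']).flatten = ('1' :: body m) ++ [' '] := by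
  induction m with
  | zero => decide
  | succ m ih =>
    rw [List.replicate_succ, List.flatten_cons, ih, body_succ]
    simp

lemma list_of_doors_pos (k : Int) (hk : 1 ≤ k) :
    list_of_doors k = List.replicate k.toNat "1" := by
  obtain ⟨m, hm⟩ : ∃ m : Nat, k.toNat = m + 1 := ⟨k.toNat - 1, by omega⟩
  unfold list_of_doors
  simp only [PySem.List.pyRepeat, hm, flat_rep, PySem.List.slice_to_neg_one,
    List.dropLast_concat]
  have hsplit : PySem.Chars.splitOn ('1' :: body m) [' ']
      = List.replicate (m+1) ['1'] := by
    show PySem.Chars.splitOn.go [' '] (('1' :: body m).length + 1) ('1' :: body m) [] []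
        = List.replicate (m+1) ['1']
    rw [go_ones m _ [] (by simp [length_body])]
    simp
  rw [hsplit]
  simp [List.map_replicate]

-- ---- A-side: the toggling loops ----
-- number of toggles of door j after the outer iterations i = 1 .. I-1
def cnt (I : Int) (j : Nat) : Nat :=
  (PySem.List.pyRange 1 I 1).countP
    (fun i => decide (i ≤ (j : Int) ∧ (i + 1) ∣ ((j : Int) + 1)))

def doorsAt (n : Nat) (I : Int) : List String :=
  (List.range n).map (fun j => if Even (cnt I j) then "1" else "0")

lemma set_map_range {n m : Nat} (g : Nat → String) (v : String) :
    ((List.range n).map g).set m v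
      = (List.range n).map (fun j => if j = m then v else g j) := by
  apply List.ext_getElem
  · simp
  · intro i h1 h2
    rw [List.getElem_set]
    simp only [List.getElem_map, List.getElem_range]
    by_cases h : m = i
    · simp [h]
    · have h' : ¬ i = m := fun hh => h hh.symm
      simp [h, h']

lemma nodup_pyRange_pos (a b s : Int) (hs : 0 < s) : (PySem.List.pyRange a b s).Nodup := by
  rw [PySem.List.pyRange_of_pos a b hs]
  apply List.Nodup.map
  · intro x y hxy
    simp at hxy
    omega
  · exact List.nodup_range

lemma foldl_toggle (L : List Int) (hN : L.Nodup) (n : Nat) (g : Nat → String)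
    (hL : ∀ x ∈ L, 0 ≤ x ∧ x < (n : Int)) :
    L.foldl
      (fun ds j => PySem.List.pySetD ds j
        (if PySem.List.pyGetD ds j "" = "1" then "0" else "1"))
      ((List.range n).map g)
    = (List.range n).map
        (fun (j : Nat) => if (j : Int) ∈ L then (if g j = "1" then "0" else "1") else g j) := by
  induction L generalizing g with
  | nil => simp
  | cons a L ih =>
    obtain ⟨ha0, han⟩ := hL a (List.mem_cons_self ..)
    have hAT : a.toNat < n := by omega
    rw [List.foldl_cons]
    have hget : PySem.List.pyGetD ((List.range n).map g) a "" = g a.toNat := by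
      rw [PySem.List.pyGetD_eq_getElem _ _ ha0 (by simpa using han)]
      simp
    have hset : PySem.List.pySetD ((List.range n).map g) a
        (if PySem.List.pyGetD ((List.range n).map g) a "" = "1" then "0" else "1")
        = (List.range n).map (fun j => if j = a.toNat then (if g a.toNat = "1" then "0" else "1") else g j) := by
      rw [hget, PySem.List.pySetD_of_nonneg _ _ ha0, set_map_range]
    rw [hset, ih (List.Nodup.of_cons hN) _ (fun x hx => hL x (List.mem_cons_of_mem _ hx))]
    apply List.map_congr_left
    intro j hj
    simp only [List.mem_range] at hj
    by_cases hja : j = a.toNat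
    · have hna : a ∉ L := (List.nodup_cons.mp hN).1
      simp [hja, hna, ha0]
    · have hj1 : ¬ ((j : Int) = a) := by omega
      simp [hj1, hja]

lemma cnt_succ (I : Int) (hI : 1 ≤ I) (j : Nat) :
    cnt (I + 1) j = cnt I j
      + (if I ≤ (j : Int) ∧ (I + 1) ∣ ((j : Int) + 1) then 1 else 0) := by
  unfold cnt
  rw [PySem.List.pyRange_one_succ_right (by omega), List.countP_append]
  simp [List.countP_cons]

lemma A_fold (k : Int) (hk : 1 ≤ k) (I : Int) (h1 : 1 ≤ I) (hI : I ≤ k) :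
    (PySem.List.pyRange 1 I 1).foldl
      (fun (st : List String × Int) i =>
        ((PySem.List.pyRange i k (st.2 + 1)).foldl
          (fun ds j => PySem.List.pySetD ds j
            (if PySem.List.pyGetD ds j "" = "1" then "0" else "1")) st.1,
         st.2 + 1))
      (doorsAt k.toNat 1, 1)
    = (doorsAt k.toNat I, I) := by
  revert hI
  induction I, h1 using Int.le_induction with
  | base =>
    intro _
    rw [PySem.List.pyRange_one_eq_nil (by omega)]
    simp
  | succ I hI1 ih =>
    intro hIk
    rw [PySem.List.pyRange_one_succ_right (by omega), List.foldl_append,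
      ih (by omega), List.foldl_cons, List.foldl_nil]
    have hmem : ∀ x ∈ PySem.List.pyRange I k (I + 1), 0 ≤ x ∧ x < ((k.toNat : Nat) : Int) := by
      intro x hx
      rw [PySem.List.mem_pyRange_iff_of_pos (by omega)] at hx
      constructor
      · omega
      · have : ((k.toNat : Nat) : Int) = k := by omega
        omega
    rw [show doorsAt k.toNat I = (List.range k.toNat).map (fun j => if Even (cnt I j) then "1" else "0") from rfl]
    rw [foldl_toggle _ (nodup_pyRange_pos _ _ _ (by omega)) _ _ hmem]
    refine Prod.ext ?_ rfl
    dsimp only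
    unfold doorsAt
    apply List.map_congr_left
    intro j hj
    simp only [List.mem_range] at hj
    have hjk : (j : Int) < k := by omega
    have hmem' : ((j : Int) ∈ PySem.List.pyRange I k (I + 1))
        ↔ (I ≤ (j : Int) ∧ (I + 1) ∣ ((j : Int) + 1)) := by
      rw [PySem.List.mem_pyRange_iff_of_pos (by omega)]
      constructor
      · rintro ⟨ha, hb, hc⟩
        refine ⟨ha, ?_⟩
        have heq : ((j : Int) + 1) = ((j : Int) - I) + (I + 1) := by ring
        rw [heq]
        exact (Int.dvd_add_right hc).mpr dvd_rfl
      · rintro ⟨ha, hb⟩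
        refine ⟨ha, hjk, ?_⟩
        have heq : ((j : Int) - I) = ((j : Int) + 1) - (I + 1) := by ring
        rw [heq]
        exact dvd_sub hb dvd_rfl
    rw [cnt_succ I (by omega) j]
    by_cases hc : I ≤ (j : Int) ∧ (I + 1) ∣ ((j : Int) + 1)
    · rw [if_pos (hmem'.mpr hc), if_pos hc]
      by_cases he : Even (cnt I j) <;> simp [he, Nat.even_add_one]
    · rw [if_neg (fun h => hc (hmem'.mp h)), if_neg hc]
      simp

-- ---- divisor-count parity: odd iff perfect square ----
lemma pair_card (m : Nat) (hm : m ≠ 0) :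
    (m.divisors.filter (fun d => d*d < m)).card
      = (m.divisors.filter (fun d => m < d*d)).card := by
  apply Finset.card_bij' (i := fun d _ => m / d) (j := fun d _ => m / d)
  · intro d hd
    simp only [Finset.mem_filter, Nat.mem_divisors] at hd ⊢
    obtain ⟨⟨hdvd, _⟩, hlt⟩ := hd
    have hd0 : d ≠ 0 := by rintro rfl; simp at hlt; omega
    have hmul : m / d * d = m := Nat.div_mul_cancel hdvd
    refine ⟨⟨Nat.div_dvd_of_dvd hdvd, hm⟩, ?_⟩
    nlinarith [Nat.pos_of_ne_zero hd0, Nat.pos_of_ne_zero hm]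
  · intro d hd
    simp only [Finset.mem_filter, Nat.mem_divisors] at hd ⊢
    obtain ⟨⟨hdvd, _⟩, hlt⟩ := hd
    have hd0 : d ≠ 0 := by rintro rfl; exact hm (Nat.eq_zero_of_zero_dvd hdvd)
    have hmul : m / d * d = m := Nat.div_mul_cancel hdvd
    refine ⟨⟨Nat.div_dvd_of_dvd hdvd, hm⟩, ?_⟩
    nlinarith [Nat.pos_of_ne_zero hd0, Nat.pos_of_ne_zero hm]
  · intro d hd
    simp only [Finset.mem_filter, Nat.mem_divisors] at hd
    exact Nat.div_div_self hd.1.1 hm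
  · intro d hd
    simp only [Finset.mem_filter, Nat.mem_divisors] at hd
    exact Nat.div_div_self hd.1.1 hm

lemma odd_card_divisors_iff (m : Nat) (hm : m ≠ 0) :
    Odd m.divisors.card ↔ Nat.sqrt m * Nat.sqrt m = m := by
  classical
  have h1 : m.divisors.card
      = (m.divisors.filter (fun d => d*d < m)).card
        + ((m.divisors.filter (fun d => ¬ (d*d < m))).card) :=
    (Finset.card_filter_add_card_filter_not _).symm
  have h2 : (m.divisors.filter (fun d => ¬ (d*d < m))).card
      = (m.divisors.filter (fun d => d*d = m)).card
        + (m.divisors.filter (fun d => m < d*d)).card := by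
    rw [← Finset.card_union_of_disjoint]
    · congr 1
      ext d
      simp only [Finset.mem_union, Finset.mem_filter]
      constructor
      · rintro ⟨hd, hnlt⟩
        rcases Nat.lt_or_ge m (d*d) with h | h
        · exact Or.inr ⟨hd, h⟩
        · exact Or.inl ⟨hd, by omega⟩
      · rintro (⟨hd, he⟩ | ⟨hd, hgt⟩) <;> exact ⟨hd, by omega⟩
    · rw [Finset.disjoint_left]
      intro a ha hb
      simp only [Finset.mem_filter] at ha hb
      omega
  have hE : (m.divisors.filter (fun d => d*d = m)).card
      = if Nat.sqrt m * Nat.sqrt m = m then 1 else 0 := by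
    split_ifs with hsq
    · rw [Finset.card_eq_one]
      refine ⟨Nat.sqrt m, ?_⟩
      ext d
      simp only [Finset.mem_filter, Nat.mem_divisors, Finset.mem_singleton]
      constructor
      · rintro ⟨_, hdd⟩
        nlinarith [Nat.sqrt_le m, Nat.lt_succ_sqrt m]
      · rintro rfl
        exact ⟨⟨Dvd.intro _ hsq, hm⟩, hsq⟩
    · rw [Finset.card_eq_zero]
      ext d
      simp only [Finset.mem_filter, Nat.mem_divisors, Finset.notMem_empty, iff_false]
      rintro ⟨_, hdd⟩
      have : Nat.sqrt m = d := by rw [← hdd, show d * d = d ^ 2 by ring, Nat.sqrt_eq']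
      exact hsq (by rw [this]; exact hdd)
  rw [h1, h2, ← pair_card m hm, hE]
  split_ifs with hsq <;> simp [hsq, Nat.odd_iff, Nat.even_iff] <;> omega

lemma countP_range_eq (K : Nat) (q : Nat → Bool) :
    (List.range K).countP q = ((Finset.range K).filter (fun t => q t = true)).card := by
  induction K with
  | zero => simp
  | succ K ih =>
    rw [List.range_succ, List.countP_append, Finset.range_add_one, Finset.filter_insert]
    by_cases h : q K = true
    · rw [if_pos h, Finset.card_insert_of_notMem (by simp)]
      simp [h, ih]
    · rw [if_neg h]
      simp [List.countP_cons, h, ih]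

lemma cnt_eq (k : Int) (j : Nat) (hj : (j : Int) < k) :
    cnt k j = (j + 1).divisors.card - 1 := by
  have hq : cnt k j = (List.range (k-1).toNat).countP
      (fun t : Nat => decide ((1 + (t:Int)) ≤ (j : Int) ∧ ((1 + (t:Int)) + 1) ∣ ((j : Int) + 1))) := by
    unfold cnt
    rw [PySem.List.pyRange_one, List.countP_map]
    rfl
  rw [hq, countP_range_eq]
  have hbij : ((Finset.range (k-1).toNat).filter
        (fun t : Nat => (decide ((1 + (t:Int)) ≤ (j : Int) ∧ ((1 + (t:Int)) + 1) ∣ ((j : Int) + 1))) = true)).card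
      = ((j+1).divisors.filter (fun d => 2 ≤ d)).card := by
    refine Finset.card_bij' (fun t _ => t + 2) (fun d _ => d - 2) ?hi ?hj ?li ?ri
    case hi =>
      intro t ht
      dsimp only
      simp only [Finset.mem_filter, Finset.mem_range, decide_eq_true_eq] at ht
      obtain ⟨hr, hle, hdvd⟩ := ht
      simp only [Finset.mem_filter, Nat.mem_divisors]
      refine ⟨⟨?_, by omega⟩, by omega⟩
      have h2 : ((t + 2 : Nat) : Int) ∣ (((j + 1 : Nat) : Int)) := by
        have e1 : ((t + 2 : Nat) : Int) = 1 + (t : Int) + 1 := by push_cast; ring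
        have e2 : ((j + 1 : Nat) : Int) = (j : Int) + 1 := by push_cast; ring
        rw [e1, e2]
        exact hdvd
      exact_mod_cast h2
    case hj =>
      intro d hd
      dsimp only
      simp only [Finset.mem_filter, Nat.mem_divisors] at hd
      obtain ⟨⟨hdvd, hne⟩, h2⟩ := hd
      have hdle : d ≤ j + 1 := Nat.le_of_dvd (by omega) hdvd
      simp only [Finset.mem_filter, Finset.mem_range, decide_eq_true_eq]
      refine ⟨by omega, by omega, ?_⟩
      have h3 : ((d : Nat) : Int) ∣ ((j : Int) + 1) := by
        have := Int.natCast_dvd_natCast.mpr hdvd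
        push_cast at this
        exact this
      have e1 : (1 : Int) + ((d - 2 : Nat) : Int) + 1 = (d : Int) := by
        have : ((d - 2 : Nat) : Int) = (d : Int) - 2 := by
          push_cast [Nat.cast_sub h2]
          ring
        rw [this]; ring
      rw [e1]
      exact h3
    case li =>
      intro t ht
      dsimp only
      omega
    case ri =>
      intro d hd
      dsimp only
      simp only [Finset.mem_filter, Nat.mem_divisors] at hd
      omega
  rw [hbij]
  have hone : ((j+1).divisors.filter (fun d => ¬ 2 ≤ d)) = {1} := by
    ext d
    simp only [Finset.mem_filter, Nat.mem_divisors, Finset.mem_singleton]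
    constructor
    · rintro ⟨⟨hdvd, _⟩, h2⟩
      have hd0 : d ≠ 0 := by rintro rfl; simp at hdvd
      omega
    · rintro rfl
      exact ⟨⟨one_dvd _, by omega⟩, by omega⟩
  have htot := Finset.card_filter_add_card_filter_not (s := (j+1).divisors) (fun d => 2 ≤ d)
  rw [hone] at htot
  simp only [Finset.card_singleton] at htot
  omega

lemma doorsAt_eq_spec (k : Int) (hk : 1 ≤ k) : doorsAt k.toNat k = specDoors k.toNat := by
  unfold doorsAt specDoors
  apply List.map_congr_left
  intro j hj
  simp only [List.mem_range] at hj
  have hjk : (j : Int) < k := by omega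
  rw [cnt_eq k j hjk]
  have hpos : 0 < (j+1).divisors.card :=
    Finset.card_pos.mpr ⟨1, Nat.one_mem_divisors.mpr (by omega)⟩
  have hiff := odd_card_divisors_iff (j+1) (by omega)
  unfold sqDoor
  by_cases hsq : Nat.sqrt (j+1) * Nat.sqrt (j+1) = j + 1
  · have hodd : Odd (j+1).divisors.card := hiff.mpr hsq
    rw [if_pos hsq, if_pos]
    rw [Nat.odd_iff] at hodd
    rw [Nat.even_sub (by omega)]
    simp [Nat.even_iff, hodd]
  · have hnodd : ¬ Odd (j+1).divisors.card := fun h => hsq (hiff.mp h)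
    rw [if_neg hsq, if_neg]
    rw [Nat.odd_iff] at hnodd
    rw [Nat.even_sub (by omega)]
    simp [Nat.even_iff]
    omega

lemma doorsAt_one (n : Nat) : doorsAt n 1 = List.replicate n "1" := by
  unfold doorsAt cnt
  rw [PySem.List.pyRange_one_eq_nil le_rfl]
  simp [List.map_const']

lemma A_eq (k : Int) : Keymaker k = PySem.Str.join "" (specDoors k.toNat) := by
  by_cases hk : k ≤ 0
  · have h0 : PySem.List.pyRange 1 k 1 = [] := PySem.List.pyRange_one_eq_nil (by omega)
    have hdoors : list_of_doors k = [""] := by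
      unfold list_of_doors
      have ht : k.toNat = 0 := by omega
      simp only [PySem.List.pyRepeat, ht]
      decide
    have ht : k.toNat = 0 := by omega
    simp [Keymaker, h0, hdoors, ht, string_of_doors, specDoors]
    decide
  · have hk1 : 1 ≤ k := by omega
    simp only [Keymaker]
    rw [list_of_doors_pos k hk1, ← doorsAt_one k.toNat, A_fold k hk1 k hk1 le_rfl,
      doorsAt_eq_spec k hk1]
    rfl

-- ===== VERDICT (by name: the statement is the Claim_ definition above) =====
theorem Keymaker_spec : Claim_equal_Keymaker := by
  intro k _
  unfold Spec_Keymaker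
  rw [A_eq, B_eq]
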